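-- pv_equiv track=rewrite | github.com/Shaiba02/Best-Tongue-Twister | main.py | frequency_score_count
-- ===== SOURCE A (Python) =====
-- from collections import Counter
--
-- def frequency_score_count(line):
--     '''
--     returns frequency score of the tongue twister
--     '''
--     word_occurance = Counter(line)
--     list_frequency = []
--     for key in word_occurance:
--         if key not in ['a','e','i','o','u'] and word_occurance[key]>1:
--             list_frequency.append(word_occurance[key])
--
--     result = sum(list_frequency)
--     return result
-- ===== SOURCE B (Python) =====
-- def frequency_score_count(line):
--     '''
--     returns frequency score of the tongue twister
--     '''
--     s = sorted(line)
--     total = 0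
--     while s:
--         ch = s[0]
--         n = 1
--         while n < len(s) and s[n] == ch:
--             n += 1
--         if ch not in ('a', 'e', 'i', 'o', 'u') and n > 1:
--             total += n
--         s = s[n:]
--     return total
-- ===== Notes on version B (the rewrite author's own statement) =====
-- stated objective: alternative
-- what changed: Replaces the Counter hash table and key loop by a sort-then-run-scan: sort the characters and sum the lengths of non-vowel runs longer than 1.
import Mathlib
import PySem

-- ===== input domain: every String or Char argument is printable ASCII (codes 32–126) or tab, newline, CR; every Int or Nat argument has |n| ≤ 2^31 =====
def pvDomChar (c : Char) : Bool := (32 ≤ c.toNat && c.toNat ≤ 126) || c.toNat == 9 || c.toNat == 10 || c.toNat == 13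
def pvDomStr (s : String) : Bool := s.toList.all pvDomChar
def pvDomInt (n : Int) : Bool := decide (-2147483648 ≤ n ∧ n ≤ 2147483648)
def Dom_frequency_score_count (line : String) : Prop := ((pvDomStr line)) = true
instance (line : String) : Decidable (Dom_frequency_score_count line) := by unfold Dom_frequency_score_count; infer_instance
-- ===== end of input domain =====

-- B replaces A's Counter-and-key-loop by a sort-then-run-scan over the characters (alternative algorithm, same result).

-- ===== PORT A =====
-- Counter(line); for key in it, append count when key is a non-vowel with count > 1; sum.
-- word_occurance[key] is ported as getD (the key is always present, so no KeyError).
def frequency_score_count (line : String) : Int :=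
  let word_occurance := PySem.Dict.counter line.toList
  let list_frequency := word_occurance.keys.foldl
    (fun acc key =>
      if key ∉ (['a', 'e', 'i', 'o', 'u'] : List Char) ∧ word_occurance.getD key 0 > 1
      then acc ++ [word_occurance.getD key 0] else acc) ([] : List Int)
  list_frequency.sum

-- ===== PORT B =====
-- inner `while` counting the run = takeWhile; `s = s[n:]` = dropWhile (the first n entries are exactly the run).
def fscRun : List Char → Int
  | [] => 0
  | ch :: rest =>
    let n : Int := 1 + (rest.takeWhile (· == ch)).length
    (if ch ∉ (['a', 'e', 'i', 'o', 'u'] : List Char) ∧ n > 1 then n else 0)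
      + fscRun (rest.dropWhile (· == ch))
termination_by s => s.length
decreasing_by
  simpa using Nat.lt_succ_of_le (List.Sublist.length_le (List.dropWhile_sublist _))

def frequency_score_count_alt (line : String) : Int :=
  fscRun (PySem.List.sorted line.toList (fun x => x) false)

-- ===== PRECONDITION & SPEC =====
def Spec_frequency_score_count (line : String) (out : Int) : Prop := out = frequency_score_count_alt line
instance (line : String) (out : Int) : Decidable (Spec_frequency_score_count line out) := by unfold Spec_frequency_score_count; infer_instance

-- ===== CLAIM (what is proved, stated in full; the proofs are below) =====
def Claim_equal_frequency_score_count : Prop := ∀ (line : String), Dom_frequency_score_count line → Spec_frequency_score_count line (frequency_score_count line)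

-- ===== LEMMAS AND PROOFS =====

-- the per-distinct-character contribution, relative to a character list l
def fscF (l : List Char) (k : Char) : Int :=
  if k ∉ (['a', 'e', 'i', 'o', 'u'] : List Char) ∧ (l.count k : Int) > 1
  then (l.count k : Int) else 0

theorem sum_map_filter_eq {α : Type} (xs : List α) (p : α → Bool) (g : α → Int) :
    ((xs.filter p).map g).sum = (xs.map (fun k => if p k then g k else 0)).sum := by
  induction xs with
  | nil => rfl
  | cons x xs ih =>
    by_cases h : p x <;> simp [h, ih]

theorem portA_eq (line : String) :
    frequency_score_count line = ((PySem.List.dedup line.toList).map (fscF line.toList)).sum := by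
  unfold frequency_score_count
  simp only [PySem.List.foldl_append_ite
    (fun key => key ∉ (['a', 'e', 'i', 'o', 'u'] : List Char) ∧
      (PySem.Dict.counter line.toList).getD key 0 > 1)
    (fun key => (PySem.Dict.counter line.toList).getD key 0),
    List.nil_append, sum_map_filter_eq, PySem.Dict.keys_counter]
  apply congrArg List.sum
  apply List.map_congr_left
  intro k _
  simp [fscF, PySem.Dict.getD_counter]

theorem fscRun_eq_aux (n : Nat) : ∀ (s : List Char), s.length ≤ n → s.Pairwise (· ≤ ·) →
    fscRun s = ((PySem.List.dedup s).map (fscF s)).sum := by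
  induction n with
  | zero =>
    intro s h _
    have hs : s = [] := List.eq_nil_of_length_eq_zero (Nat.le_zero.mp h)
    subst hs
    simp [fscRun, PySem.List.dedup, PySem.Set.ofList]
  | succ n ih =>
    intro s hlen hs
    match s with
    | [] => simp [fscRun, PySem.List.dedup, PySem.Set.ofList]
    | c :: rest =>
      have hcle : ∀ x ∈ rest, c ≤ x := (List.pairwise_cons.mp hs).1
      have hpr : rest.Pairwise (· ≤ ·) := (List.pairwise_cons.mp hs).2
      have hpr' : (rest.dropWhile (· == c)).Pairwise (· ≤ ·) :=
        hpr.sublist (List.dropWhile_sublist _)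
      have hrun : ∀ x ∈ rest.takeWhile (· == c), x = c := by
        intro x hx
        have hb : (x == c) = true := List.mem_takeWhile_imp (p := fun y => y == c) hx
        exact eq_of_beq hb
      have hcnot : c ∉ rest.dropWhile (· == c) := by
        intro hc
        cases hr : rest.dropWhile (· == c) with
        | nil => rw [hr] at hc; exact absurd hc (List.not_mem_nil)
        | cons h t =>
          have hhead : (h == c) = false := by
            have hw : rest.dropWhile (· == c) ≠ [] := by rw [hr]; simp
            have := List.head_dropWhile_not (· == c) (l := rest) hw
            simp only [hr, List.head_cons] at this
            exact this
          have hne : h ≠ c := by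
            intro he; rw [he] at hhead; simp at hhead
          rw [hr] at hc
          rcases List.mem_cons.mp hc with he | ht
          · exact hne he.symm
          · have h1 : h ≤ c := by
              have := (List.pairwise_cons.mp (hr ▸ hpr')).1
              exact this c ht
            have h2 : c ≤ h := by
              apply hcle
              have : h ∈ rest.dropWhile (· == c) := by rw [hr]; exact List.mem_cons_self
              exact (List.dropWhile_sublist _).mem this
            exact hne (le_antisymm h1 h2)
      have hsplit : rest.takeWhile (· == c) ++ rest.dropWhile (· == c) = rest :=
        List.takeWhile_append_dropWhile
      have hcount_c : List.count c (c :: rest) = 1 + (rest.takeWhile (· == c)).length := by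
        have h1 : List.count c rest = (rest.takeWhile (· == c)).length := by
          conv_lhs => rw [← hsplit]
          rw [List.count_append, List.count_eq_length.mpr (fun b hb => (hrun b hb).symm),
              List.count_eq_zero.mpr hcnot]
          omega
        rw [List.count_cons_self, h1]
        omega
      have hcount_ne : ∀ k, k ≠ c →
          List.count k (c :: rest) = List.count k (rest.dropWhile (· == c)) := by
        intro k hk
        have hbeq : (c == k) = false := by
          rcases hbc : (c == k) with _ | _
          · rfl
          · exact absurd (eq_of_beq hbc).symm hk
        have h2 : List.count k rest = List.count k (rest.dropWhile (· == c)) := by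
          conv_lhs => rw [← hsplit]
          rw [List.count_append, List.count_eq_zero.mpr (fun hm => hk (hrun k hm))]
          omega
        rw [List.count_cons, h2, hbeq]
        simp
      have hnodup2 : (c :: PySem.List.dedup (rest.dropWhile (· == c))).Nodup := by
        refine List.nodup_cons.mpr ⟨?_, PySem.List.nodup_dedup _⟩
        rw [PySem.List.mem_dedup]
        exact hcnot
      have hperm : (PySem.List.dedup (c :: rest)).Perm
          (c :: PySem.List.dedup (rest.dropWhile (· == c))) := by
        rw [List.perm_ext_iff_of_nodup (PySem.List.nodup_dedup _) hnodup2]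
        intro a
        rw [PySem.List.mem_dedup, List.mem_cons, List.mem_cons, PySem.List.mem_dedup]
        constructor
        · rintro (ha | ha)
          · exact Or.inl ha
          · rw [← hsplit] at ha
            rcases List.mem_append.mp ha with h1 | h2
            · exact Or.inl (hrun a h1)
            · exact Or.inr h2
        · rintro (ha | ha)
          · exact Or.inl ha
          · exact Or.inr ((List.dropWhile_sublist _).mem ha)
      have hlen' : (rest.dropWhile (· == c)).length ≤ n := by
        have h1 := List.Sublist.length_le (List.dropWhile_sublist (l := rest) (· == c))
        simp at hlen
        omega
      rw [fscRun, ih _ hlen' hpr', (hperm.map (fscF (c :: rest))).sum_eq, List.map_cons,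
          List.sum_cons]
      have hmap : (PySem.List.dedup (rest.dropWhile (· == c))).map (fscF (c :: rest)) =
          (PySem.List.dedup (rest.dropWhile (· == c))).map (fscF (rest.dropWhile (· == c))) := by
        apply List.map_congr_left
        intro k hk
        have hk' : k ∈ rest.dropWhile (· == c) := (PySem.List.mem_dedup _ _).mp hk
        have hkc : k ≠ c := fun he => hcnot (he ▸ hk')
        unfold fscF
        rw [hcount_ne k hkc]
      rw [hmap]
      have hfc : fscF (c :: rest) c =
          (if c ∉ (['a', 'e', 'i', 'o', 'u'] : List Char) ∧
              (1 + ((rest.takeWhile (· == c)).length : Int)) > 1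
           then 1 + ((rest.takeWhile (· == c)).length : Int) else 0) := by
        unfold fscF
        rw [hcount_c]
        push_cast
        rfl
      rw [hfc]

theorem fscRun_eq (s : List Char) (hs : s.Pairwise (· ≤ ·)) :
    fscRun s = ((PySem.List.dedup s).map (fscF s)).sum := by
  exact fscRun_eq_aux s.length s le_rfl hs

-- ===== VERDICT (by name: the statement is the Claim_ definition above) =====
theorem frequency_score_count_spec : Claim_equal_frequency_score_count := by
  intro line _
  show frequency_score_count line = frequency_score_count_alt line
  rw [portA_eq]
  unfold frequency_score_count_alt
  rw [fscRun_eq _ (by simpa using PySem.List.sorted_pairwise line.toList (fun x => x))]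
  have hperm : (PySem.List.sorted line.toList (fun x => x) false).Perm line.toList :=
    PySem.List.sorted_perm _ _ _
  have hf : fscF (PySem.List.sorted line.toList (fun x => x) false) = fscF line.toList := by
    funext k
    unfold fscF
    rw [hperm.count_eq k]
  rw [hf]
  have hd : (PySem.List.dedup line.toList).Perm
      (PySem.List.dedup (PySem.List.sorted line.toList (fun x => x) false)) := by
    rw [List.perm_ext_iff_of_nodup (PySem.List.nodup_dedup _) (PySem.List.nodup_dedup _)]
    intro a
    rw [PySem.List.mem_dedup, PySem.List.mem_dedup, hperm.mem_iff]
  exact (hd.map (fscF line.toList)).sum_eq
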